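-- pv_equiv track=rewrite | github.com/owais-ch/Arrays | Maximum Sum Of (i * ARR[i]).py | maxmValueAmongAllRotations
-- ===== SOURCE A (Python) =====
-- def maxmValueAmongAllRotations(arr, n):
--     pro=0
--     for i in range(n):
--         pro=pro+(arr[i]*i)
--
--     maximum=pro
--     total=sum(arr)
--
--     j=n-1
--
--     for i in range(n-1):
--         total=total-arr[j]
--         pro=pro-(arr[j]*(n-1))+total
--         total+=arr[j]
--         maximum=max(maximum,pro)
--         j-=1
--     return maximum
-- ===== SOURCE B (Python) =====
-- def maxmValueAmongAllRotations(arr, n):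
--     total = sum(arr)
--     base = sum(i * x for i, x in enumerate(arr[:n]))
--     return max((base + k * total - n * sum(arr[n - k:n]) for k in range(n)),
--                default=0)
-- ===== Notes on version B (the rewrite author's own statement) =====
-- stated objective: simpler
-- what changed: Replaces A's stateful incremental recurrence (pro, total and a backward index j mutated each step) by a stateless closed form: the value of rotation k is base + k*sum(arr) - n*sum(arr[n-k:n]), recomputed independently for each k and maxed with default 0.
import Mathlib
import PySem

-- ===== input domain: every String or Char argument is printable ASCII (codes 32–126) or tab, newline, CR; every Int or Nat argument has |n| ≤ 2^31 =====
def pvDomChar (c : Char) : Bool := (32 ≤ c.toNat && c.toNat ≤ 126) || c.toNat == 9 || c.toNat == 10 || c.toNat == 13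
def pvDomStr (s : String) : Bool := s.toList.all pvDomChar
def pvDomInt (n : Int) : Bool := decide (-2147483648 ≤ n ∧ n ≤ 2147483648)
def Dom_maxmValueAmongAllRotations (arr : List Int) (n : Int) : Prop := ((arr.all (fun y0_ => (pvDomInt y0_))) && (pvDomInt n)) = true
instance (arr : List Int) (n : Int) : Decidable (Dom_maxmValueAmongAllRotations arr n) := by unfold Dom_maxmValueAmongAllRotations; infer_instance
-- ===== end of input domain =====

-- B replaces A's stateful incremental recurrence by a stateless closed form per rotation
-- (base + k*sum(arr) - n*sum(arr[n-k:n]), maxed with default 0); A = B wherever A returns.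

-- ===== PORT A =====
-- arr[i] / arr[j] are ported with pyGetD _ _ 0; exact because Pre_ keeps every index in range.
def maxmValueAmongAllRotations (arr : List Int) (n : Int) : Int :=
  let pro : Int := (PySem.List.pyRange 0 n 1).foldl
    (fun pro i => pro + (PySem.List.pyGetD arr i 0) * i) 0
  let maximum := pro
  let total : Int := arr.sum
  let j : Int := n - 1
  let st := (PySem.List.pyRange 0 (n - 1) 1).foldl
    (fun (st : Int × Int × Int × Int) _i =>
      let total := st.1; let pro := st.2.1; let maximum := st.2.2.1; let j := st.2.2.2
      let total := total - PySem.List.pyGetD arr j 0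
      let pro := pro - (PySem.List.pyGetD arr j 0) * (n - 1) + total
      let total := total + PySem.List.pyGetD arr j 0
      let maximum := max maximum pro
      let j := j - 1
      (total, pro, maximum, j))
    (total, pro, maximum, j)
  st.2.2.1

-- ===== PORT B =====
def maxmValueAmongAllRotations_alt (arr : List Int) (n : Int) : Int :=
  let total : Int := arr.sum
  let base : Int := ((PySem.List.enumerate (PySem.List.slice arr none (some n)) 0).map
    (fun p => p.1 * p.2)).sum
  let vals := (PySem.List.pyRange 0 n 1).map (fun k =>
    base + k * total - n * (PySem.List.slice arr (some (n - k)) (some n)).sum)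
  (PySem.List.max? vals (fun x => x)).getD 0

-- ===== PRECONDITION & SPEC =====
-- Pre_ excludes exactly the inputs on which A raises IndexError (arr[i] with n > len(arr)).
def Pre_maxmValueAmongAllRotations (arr : List Int) (n : Int) : Prop :=
  n ≤ (arr.length : Int)
instance (arr : List Int) (n : Int) : Decidable (Pre_maxmValueAmongAllRotations arr n) := by
  unfold Pre_maxmValueAmongAllRotations; infer_instance

def pvWitness_maxmValueAmongAllRotations : List Int × Int := ([4, -2, 7, 1], 4)

def Spec_maxmValueAmongAllRotations (arr : List Int) (n : Int) (out : Int) : Prop :=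
  out = maxmValueAmongAllRotations_alt arr n
instance (arr : List Int) (n : Int) (out : Int) :
    Decidable (Spec_maxmValueAmongAllRotations arr n out) := by
  unfold Spec_maxmValueAmongAllRotations; infer_instance

-- ===== CLAIM (what is proved, stated in full; the proofs are below) =====
def Claim_equal_maxmValueAmongAllRotations : Prop :=
  ∀ (arr : List Int) (n : Int), Dom_maxmValueAmongAllRotations arr n →
    Pre_maxmValueAmongAllRotations arr n →
    Spec_maxmValueAmongAllRotations arr n (maxmValueAmongAllRotations arr n)

-- ===== LEMMAS AND PROOFS =====

-- P L = sum(i * L[i]) — the weighted sum of one rotation.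
def pvP (L : List Int) : Int := ((PySem.List.enumerate L 0).map (fun p => p.1 * p.2)).sum

-- rotation by s: L[s:] ++ L[:s]
def pvRot (L : List Int) (s : Nat) : List Int := L.drop s ++ L.take s

lemma pvQ_shift (t : List Int) : ∀ s : Int,
    ((PySem.List.enumerate t s).map (fun p => p.1 * p.2)).sum = s * t.sum + pvP t := by
  induction t with
  | nil => intro s; simp [pvP, PySem.List.enumerate_nil]
  | cons x t ih =>
    intro s
    have h1 := ih (s + 1)
    have h0 := ih 1
    simp only [pvP, PySem.List.enumerate_cons, List.map_cons, List.sum_cons, zero_add] at *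
    rw [h1, h0]
    ring

lemma pvP_cons (x : Int) (t : List Int) : pvP (x :: t) = t.sum + pvP t := by
  have h := pvQ_shift t 1
  simp only [pvP, PySem.List.enumerate_cons, List.map_cons, List.sum_cons, zero_add] at *
  rw [h]; ring

lemma pvP_append_singleton (t : List Int) (x : Int) :
    pvP (t ++ [x]) = pvP t + (t.length : Int) * x := by
  have h := pvQ_shift [x] (t.length : Int)
  simp only [pvP, PySem.List.enumerate_append, List.map_append, List.sum_append,
    zero_add] at *
  rw [h]
  simp [PySem.List.enumerate_cons, PySem.List.enumerate_nil]

lemma pvP_rot_succ (L : List Int) (s : Nat) (hs : s < L.length) :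
    pvP (pvRot L (s + 1)) = pvP (pvRot L s) - L.sum + (L.length : Int) * L[s] := by
  have hdrop : L.drop s = L[s] :: L.drop (s + 1) := List.drop_eq_getElem_cons hs
  have htake : L.take (s + 1) = L.take s ++ [L[s]] := by
    rw [List.take_add_one]; simp [List.getElem?_eq_getElem hs]
  have hrot1 : pvRot L (s + 1) = (L.drop (s + 1) ++ L.take s) ++ [L[s]] := by
    unfold pvRot
    rw [htake, List.append_assoc]
  have hrot0 : pvRot L s = L[s] :: (L.drop (s + 1) ++ L.take s) := by
    unfold pvRot
    rw [hdrop, List.cons_append]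
  have hsum : L.sum = L[s] + (L.drop (s + 1) ++ L.take s).sum := by
    conv_lhs => rw [← List.take_append_drop s L, hdrop]
    simp only [List.sum_append, List.sum_cons]
    ring
  have hlen : (L.length : Int) = (L.drop (s + 1) ++ L.take s).length + 1 := by
    have h1 : s + 1 ≤ L.length := hs
    simp [List.length_append, List.length_take, List.length_drop]
    omega
  rw [hrot1, pvP_append_singleton, hrot0, pvP_cons, hsum, hlen]
  ring

-- closed form for the rotation sums: pvP (rot L (m-d)) = pvP L + d*sum L - m*sum (L.drop (m-d))
lemma pvP_rot_closed (L : List Int) : ∀ d : Nat, d ≤ L.length →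
    pvP (pvRot L (L.length - d))
      = pvP L + (d : Int) * L.sum - (L.length : Int) * (L.drop (L.length - d)).sum := by
  intro d
  induction d with
  | zero =>
    intro _
    have h1 : pvRot L (L.length - 0) = L := by
      unfold pvRot
      simp
    rw [h1]
    simp
  | succ d ih =>
    intro hd
    have hs : L.length - (d + 1) < L.length := by omega
    have hstep := pvP_rot_succ L (L.length - (d + 1)) hs
    have hse : L.length - (d + 1) + 1 = L.length - d := by omega
    rw [hse] at hstep
    have hih := ih (by omega)
    have hdrop : L.drop (L.length - (d + 1))
        = L[L.length - (d + 1)] :: L.drop (L.length - d) := by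
      rw [List.drop_eq_getElem_cons hs, hse]
    rw [hdrop]
    simp only [List.sum_cons]
    have hcast : ((d + 1 : Nat) : Int) = (d : Int) + 1 := by push_cast; ring
    rw [hcast]
    linear_combination hih - hstep

-- reading arr[j] for j < m is reading (arr.take m)[j]
lemma pvGet_take (arr : List Int) (m j : Nat) (hj : j < m) (hm : m ≤ arr.length) :
    PySem.List.pyGetD arr (j : Int) 0 = (arr.take m).getD j 0 := by
  rw [PySem.List.pyGetD_natCast]
  have hjl : j < arr.length := by omega
  have hjt : j < (arr.take m).length := by simp [List.length_take]; omega
  rw [List.getD_eq_getElem arr 0 hjl, List.getD_eq_getElem _ 0 hjt]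
  simp

-- A's first loop computes pvP (arr.take m).
lemma pvA_first_loop (arr : List Int) (m : Nat) (hm : m ≤ arr.length) :
    (PySem.List.pyRange 0 (m : Int) 1).foldl
      (fun pro i => pro + (PySem.List.pyGetD arr i 0) * i) 0 = pvP (arr.take m) := by
  rw [PySem.List.foldl_add]
  unfold pvP
  rw [PySem.List.enumerate_eq_map_pyRange (d := 0), List.map_map]
  simp only [zero_add, PySem.List.len_eq]
  have hlen : ((arr.take m).length : Int) = (m : Int) := by
    simp [List.length_take]; omega
  rw [hlen]
  apply congrArg List.sum
  apply List.map_congr_left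
  intro j hjmem
  have hjb := (PySem.List.mem_pyRange_one).mp hjmem
  obtain ⟨jn, rfl⟩ : ∃ jn : Nat, j = (jn : Int) :=
    ⟨j.toNat, (Int.toNat_of_nonneg hjb.1).symm⟩
  have hjn : jn < m := by exact_mod_cast hjb.2
  simp only [Function.comp_apply]
  rw [pvGet_take arr m jn hjn hm, PySem.List.pyGetD_natCast]
  ring

-- A's second loop, characterized after k iterations.
lemma pvAloop (arr : List Int) (m : Nat) (hm1 : 1 ≤ m) (hml : m ≤ arr.length) :
    ∀ k : Nat, k ≤ m - 1 →
    (PySem.List.pyRange 0 (k : Int) 1).foldl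
      (fun (st : Int × Int × Int × Int) _i =>
        let total := st.1; let pro := st.2.1; let maximum := st.2.2.1; let j := st.2.2.2
        let total := total - PySem.List.pyGetD arr j 0
        let pro := pro - (PySem.List.pyGetD arr j 0) * ((m : Int) - 1) + total
        let total := total + PySem.List.pyGetD arr j 0
        let maximum := max maximum pro
        let j := j - 1
        (total, pro, maximum, j))
      (arr.sum, pvP (arr.take m), pvP (arr.take m), (m : Int) - 1)
    = (arr.sum,
       pvP (pvRot (arr.take m) (m - k)) + (k : Int) * (arr.drop m).sum,
       ((List.range k).map (fun i =>
         pvP (pvRot (arr.take m) (m - 1 - i)) + ((i : Int) + 1) * (arr.drop m).sum)).foldl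
         max (pvP (arr.take m)),
       (m : Int) - 1 - (k : Int)) := by
  intro k
  induction k with
  | zero =>
    intro _
    rw [PySem.List.pyRange_one_eq_nil (by omega)]
    have hlenF : (arr.take m).length = m := by simp [List.length_take]; omega
    have hrot : pvRot (arr.take m) (m - 0) = arr.take m := by
      unfold pvRot
      rw [Nat.sub_zero, List.drop_of_length_le hlenF.le, List.take_of_length_le hlenF.le,
        List.nil_append]
    rw [hrot]
    simp
  | succ k ih =>
    intro hk1
    have hk : k ≤ m - 1 := by omega
    have hlenF : (arr.take m).length = m := by simp [List.length_take]; omega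
    have hcast : ((k + 1 : Nat) : Int) = (k : Int) + 1 := by push_cast; ring
    rw [hcast, PySem.List.pyRange_one_succ_right (by omega), List.foldl_append,
      ih hk, List.foldl_cons, List.foldl_nil]
    have hj : (m : Int) - 1 - (k : Int) = ((m - 1 - k : Nat) : Int) := by omega
    have hlt : m - 1 - k < (arr.take m).length := by omega
    have hget : PySem.List.pyGetD arr ((m : Int) - 1 - (k : Int)) 0 = (arr.take m)[m - 1 - k] := by
      rw [hj, pvGet_take arr m (m - 1 - k) (by omega) hml,
        List.getD_eq_getElem _ 0 hlt]
    dsimp only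
    rw [hget]
    have hs1 : m - 1 - k + 1 = m - k := by omega
    have hstep := pvP_rot_succ (arr.take m) (m - 1 - k) hlt
    rw [hs1] at hstep
    have hLL : (((arr.take m).length : Int)) * (arr.take m)[m - 1 - k]
        = (m : Int) * (arr.take m)[m - 1 - k] := by rw [hlenF]
    have hsumE : arr.sum = (arr.take m).sum + (arr.drop m).sum := by
      conv_lhs => rw [← List.take_append_drop m arr]
      rw [List.sum_append]
    refine Prod.ext (by ring) (Prod.ext ?_ (Prod.ext ?_ (by push_cast; ring)))
    · show pvP (pvRot (arr.take m) (m - k)) + (k : Int) * (arr.drop m).sum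
        - (arr.take m)[m - 1 - k] * ((m : Int) - 1)
        + (arr.sum - (arr.take m)[m - 1 - k])
        = pvP (pvRot (arr.take m) (m - (k + 1))) + ((k + 1 : Nat) : Int) * (arr.drop m).sum
      have hmk : m - (k + 1) = m - 1 - k := by omega
      rw [hmk, hcast]
      linear_combination hstep + hLL + hsumE
    · show max (((List.range k).map (fun i =>
          pvP (pvRot (arr.take m) (m - 1 - i)) + ((i : Int) + 1) * (arr.drop m).sum)).foldl
          max (pvP (arr.take m)))
        (pvP (pvRot (arr.take m) (m - k)) + (k : Int) * (arr.drop m).sum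
          - (arr.take m)[m - 1 - k] * ((m : Int) - 1)
          + (arr.sum - (arr.take m)[m - 1 - k]))
        = ((List.range (k + 1)).map (fun i =>
          pvP (pvRot (arr.take m) (m - 1 - i)) + ((i : Int) + 1) * (arr.drop m).sum)).foldl
          max (pvP (arr.take m))
      rw [List.range_succ, List.map_append, List.foldl_append, List.map_singleton,
        List.foldl_cons, List.foldl_nil]
      congr 1
      linear_combination hstep + hLL + hsumE

-- B's candidate for k equals A's rotation value pvP (rot T (m-k)) + k * sum(arr[m:]).
lemma pvB_val (arr : List Int) (m k : Nat) (hk : k ≤ m) (hm : m ≤ arr.length) :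
    pvP (arr.take m) + (k : Int) * arr.sum
      - (m : Int) * (PySem.List.slice arr (some ((m : Int) - (k : Int))) (some (m : Int))).sum
    = pvP (pvRot (arr.take m) (m - k)) + (k : Int) * (arr.drop m).sum := by
  set T := arr.take m with hT
  have hTlen : T.length = m := by simp [hT, List.length_take]; omega
  have hcast : (m : Int) - (k : Int) = ((m - k : Nat) : Int) := by omega
  have hslice : PySem.List.slice arr (some ((m : Int) - (k : Int))) (some (m : Int))
      = T.drop (m - k) := by
    rw [hcast, PySem.List.slice_natCast, hT, List.drop_take]
  have hclosed := pvP_rot_closed T k (by omega)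
  rw [hTlen] at hclosed
  have hsumE : arr.sum = T.sum + (arr.drop m).sum := by
    conv_lhs => rw [← List.take_append_drop m arr]
    rw [List.sum_append]
  rw [hslice, hclosed, hsumE]
  ring

-- ===== VERDICT (by name: the statement is the Claim_ definition above) =====
theorem maxmValueAmongAllRotations_spec : Claim_equal_maxmValueAmongAllRotations := by
  intro arr n _ hpre
  unfold Spec_maxmValueAmongAllRotations
  by_cases hn : n ≤ 0
  · -- both loops are empty on the A side; vals = [] on the B side
    simp only [maxmValueAmongAllRotations, maxmValueAmongAllRotations_alt]
    rw [PySem.List.pyRange_one_eq_nil hn, PySem.List.pyRange_one_eq_nil (by omega)]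
    simp [PySem.List.max?]
  · have hml : n.toNat ≤ arr.length := by
      unfold Pre_maxmValueAmongAllRotations at hpre; omega
    set m : Nat := n.toNat with hmdef
    have h : (m : Int) = n := Int.toNat_of_nonneg (by omega)
    have hm1 : 1 ≤ m := by omega
    obtain ⟨m', hm'⟩ : ∃ m', m = m' + 1 := ⟨m - 1, by omega⟩
    -- A side
    simp only [maxmValueAmongAllRotations]
    rw [← h]
    rw [pvA_first_loop arr m hml]
    have hb : (m : Int) - 1 = ((m - 1 : Nat) : Int) := by omega
    have hA := pvAloop arr m hm1 hml (m - 1) (le_refl _)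
    rw [hb] at hA
    rw [hb, hA]
    dsimp only
    -- B side
    simp only [maxmValueAmongAllRotations_alt]
    have hbase : ((PySem.List.enumerate (PySem.List.slice arr none (some ((m : Int)))) 0).map
        (fun p => p.1 * p.2)).sum = pvP (arr.take m) := by
      rw [PySem.List.slice_to_natCast]
      rfl
    have hvals : (PySem.List.pyRange 0 (m : Int) 1).map (fun k =>
        ((PySem.List.enumerate (PySem.List.slice arr none (some ((m : Int)))) 0).map
          (fun p => p.1 * p.2)).sum + k * arr.sum
          - (m : Int) * (PySem.List.slice arr (some ((m : Int) - k)) (some (m : Int))).sum)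
        = (List.range m).map (fun k =>
            pvP (pvRot (arr.take m) (m - k)) + (k : Int) * (arr.drop m).sum) := by
      rw [PySem.List.pyRange_one, List.map_map]
      simp only [Int.sub_zero, Int.toNat_natCast]
      apply List.map_congr_left
      intro k hkmem
      have hkm : k < m := List.mem_range.mp hkmem
      simp only [Function.comp_apply, zero_add]
      rw [hbase]
      exact pvB_val arr m k (by omega) hml
    rw [hvals]
    have hrange : List.range m = 0 :: (List.range (m - 1)).map Nat.succ := by
      rw [hm', Nat.add_sub_cancel, List.range_succ_eq_map]
    rw [hrange, List.map_cons, List.map_map, PySem.List.max?_id_cons, Option.getD_some]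
    have hlenF : (arr.take m).length = m := by simp [List.length_take]; omega
    have hrot0 : pvP (pvRot (arr.take m) (m - 0)) + ((0 : Nat) : Int) * (arr.drop m).sum
        = pvP (arr.take m) := by
      have h1 : pvRot (arr.take m) (m - 0) = arr.take m := by
        unfold pvRot
        rw [Nat.sub_zero, List.drop_of_length_le hlenF.le, List.take_of_length_le hlenF.le,
          List.nil_append]
      rw [h1]
      push_cast
      ring
    rw [hrot0]
    congr 1
    apply List.map_congr_left
    intro i hi
    have him : i < m - 1 := List.mem_range.mp hi
    simp only [Function.comp_apply]
    have h1 : m - Nat.succ i = m - 1 - i := by omega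
    have h2 : ((Nat.succ i : Nat) : Int) = (i : Int) + 1 := by push_cast; ring
    rw [h1, h2]
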